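-- pv_equiv track=rewrite | github.com/exo7math/python1-exo7 | tantque/tantque_5.py | quatre_et_huit_diviseurs
-- ===== SOURCE A (Python) =====
-- def nombre_de_diviseurs_2(n):
--     """ Nombre de diviseurs de n (y compris 1  et n) """
--     nb = 2  # on compte déjà 1 et n
--     for d in range(2,n//2+1):
--         if n % d == 0:
--             nb = nb + 1
--     return nb
--
-- def nombre_de_diviseurs(n):
--     return nombre_de_diviseurs_2(n)
--
-- def quatre_et_huit_diviseurs(Nmin,Nmax):
--     nb_quatre = 0
--     nb_huit = 0
--     for n in range(Nmin,Nmax):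
--         nb = nombre_de_diviseurs(n)
--         if nb == 4:
--             nb_quatre = nb_quatre + 1
--         if nb == 8:
--             nb_huit = nb_huit + 1
--     return nb_quatre, nb_huit
-- ===== SOURCE B (Python) =====
-- def quatre_et_huit_diviseurs(Nmin, Nmax):
--     # Count divisors by trial division up to the square root, pairing each
--     # divisor d with n // d (a different algorithm from A's scan up to n//2).
--     nb_quatre = 0
--     nb_huit = 0
--     for n in range(Nmin, Nmax):
--         nb = 0
--         d = 1
--         while d * d <= n:
--             if n % d == 0:
--                 nb += 1 if d * d == n else 2
--             d += 1
--         if nb == 4: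
--             nb_quatre += 1
--         elif nb == 8:
--             nb_huit += 1
--     return nb_quatre, nb_huit
-- ===== Notes on version B (the rewrite author's own statement) =====
-- stated objective: alternative
-- what changed: B counts each number's divisors by trial division only up to the square root, adding 2 per divisor pair (1 at a perfect square), instead of A's scan of every candidate up to n//2.
import Mathlib
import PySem

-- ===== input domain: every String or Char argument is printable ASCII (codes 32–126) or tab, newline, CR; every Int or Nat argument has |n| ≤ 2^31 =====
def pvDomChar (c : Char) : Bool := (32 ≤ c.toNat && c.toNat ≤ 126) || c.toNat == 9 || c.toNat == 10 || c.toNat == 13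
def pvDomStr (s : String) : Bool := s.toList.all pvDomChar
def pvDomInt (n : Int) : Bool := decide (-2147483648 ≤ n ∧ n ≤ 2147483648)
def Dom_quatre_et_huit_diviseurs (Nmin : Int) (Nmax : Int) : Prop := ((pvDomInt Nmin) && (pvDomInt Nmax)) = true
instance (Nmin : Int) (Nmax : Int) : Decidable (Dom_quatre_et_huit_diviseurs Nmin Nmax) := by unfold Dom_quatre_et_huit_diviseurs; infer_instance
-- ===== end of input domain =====

-- B counts each number's divisors by trial division up to the square root, adding 2 per divisor
-- pair (1 at a perfect square), instead of A's scan of every candidate up to n//2 (objective: alternative).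

-- ===== PORT A =====
def nombre_de_diviseurs_2 (n : Int) : Int :=
  (PySem.List.pyRange 2 (PySem.Int.floordiv n 2 + 1) 1).foldl
    (fun nb d => if PySem.Int.mod n d == 0 then nb + 1 else nb) 2

def nombre_de_diviseurs (n : Int) : Int := nombre_de_diviseurs_2 n

def quatre_et_huit_diviseurs (Nmin : Int) (Nmax : Int) : Int × Int :=
  (PySem.List.pyRange Nmin Nmax 1).foldl
    (fun s n =>
      let nb := nombre_de_diviseurs n
      let nb_quatre := if nb == 4 then s.1 + 1 else s.1
      let nb_huit := if nb == 8 then s.2 + 1 else s.2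
      (nb_quatre, nb_huit)) (0, 0)

-- ===== PORT B =====
-- termination helper for the while loop (cited in decreasing_by)
theorem pvIntLeMulSelf (d : Int) : d ≤ d * d := by
  by_cases h : d ≤ 0
  · nlinarith
  · nlinarith

-- the Python 'while d * d <= n' loop of Source B
def pvDivCountLoop (n : Int) (d : Int) (nb : Int) : Int :=
  if h : d * d ≤ n then
    pvDivCountLoop n (d + 1)
      (if PySem.Int.mod n d == 0 then (if d * d == n then nb + 1 else nb + 2) else nb)
  else nb
termination_by (n + 1 - d).toNat
decreasing_by
  have h1 := pvIntLeMulSelf d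
  omega

def quatre_et_huit_diviseurs_alt (Nmin : Int) (Nmax : Int) : Int × Int :=
  (PySem.List.pyRange Nmin Nmax 1).foldl
    (fun s n =>
      let nb := pvDivCountLoop n 1 0
      if nb == 4 then (s.1 + 1, s.2)
      else if nb == 8 then (s.1, s.2 + 1)
      else s) (0, 0)

-- ===== PRECONDITION & SPEC =====
def Spec_quatre_et_huit_diviseurs (Nmin : Int) (Nmax : Int) (out : Int × Int) : Prop := out = quatre_et_huit_diviseurs_alt Nmin Nmax
instance (Nmin : Int) (Nmax : Int) (out : Int × Int) : Decidable (Spec_quatre_et_huit_diviseurs Nmin Nmax out) := by unfold Spec_quatre_et_huit_diviseurs; infer_instance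

-- ===== CLAIM (what is proved, stated in full; the proofs are below) =====
def Claim_equal_quatre_et_huit_diviseurs : Prop := ∀ (Nmin : Int) (Nmax : Int), Dom_quatre_et_huit_diviseurs Nmin Nmax → Spec_quatre_et_huit_diviseurs Nmin Nmax (quatre_et_huit_diviseurs Nmin Nmax)

-- ===== LEMMAS AND PROOFS =====

-- generic: the counting loop of A is an init + countP
theorem pvFoldlCount (l : List Int) (p : Int → Bool) (init : Int) :
    l.foldl (fun nb d => if p d then nb + 1 else nb) init = init + (l.countP p : Int) := by
  induction l generalizing init with
  | nil => simp
  | cons x t ih =>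
    by_cases hx : p x <;> simp [hx, ih] <;> push_cast <;> ring

-- countP over an int range = card of a Nat interval filter
theorem pvCountPpyRange (a b : Nat) (p : Int → Bool) :
    (PySem.List.pyRange (a : Int) (b : Int) 1).countP p
      = ((Finset.Ico a b).filter (fun k : Nat => p (k : Int))).card := by
  induction b with
  | zero =>
    rw [PySem.List.pyRange_one_eq_nil (by exact_mod_cast Nat.zero_le a)]
    simp
  | succ b ih =>
    by_cases hab : a ≤ b
    · have : ((b + 1 : Nat) : Int) = (b : Int) + 1 := by push_cast; ring
      rw [this, PySem.List.pyRange_one_succ_right (by exact_mod_cast hab),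
        List.countP_append, ih, Nat.Ico_succ_right_eq_insert_Ico hab,
        Finset.filter_insert]
      by_cases hb : p (b : Int) <;>
        simp [hb, List.countP_cons, List.countP_nil, Finset.card_insert_of_notMem, Finset.mem_filter]
    · rw [PySem.List.pyRange_one_eq_nil (by exact_mod_cast Nat.succ_le_of_lt (Nat.lt_of_not_le hab)),
        Finset.Ico_eq_empty (by omega)]
      simp

-- A's divisor count for N ≥ 2 is the true number of divisors
theorem pvA_eq_divisors (N : Nat) (hN : 2 ≤ N) :
    nombre_de_diviseurs_2 (N : Int) = (N.divisors.card : Int) := by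
  unfold nombre_de_diviseurs_2
  rw [pvFoldlCount]
  have hfd : PySem.Int.floordiv (N : Int) 2 + 1 = ((N / 2 + 1 : Nat) : Int) := by
    have h := PySem.Int.floordiv_natCast N 2
    push_cast at h ⊢
    omega
  rw [hfd, show (2 : Int) = ((2 : Nat) : Int) by norm_num,
    pvCountPpyRange 2 (N / 2 + 1) _]
  have hset : ((Finset.Ico 2 (N / 2 + 1)).filter
        (fun k : Nat => (PySem.Int.mod (N : Int) (k : Int) == 0)))
      = (Finset.Ico 2 (N / 2 + 1)).filter (fun k => k ∣ N) := by
    apply Finset.filter_congr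
    intro k _
    simp [Int.natCast_dvd_natCast]
  rw [hset]
  have hdiv : N.divisors = insert 1 (insert N ((Finset.Ico 2 (N / 2 + 1)).filter (fun k => k ∣ N))) := by
    ext d
    simp only [Nat.mem_divisors, Finset.mem_insert, Finset.mem_filter, Finset.mem_Ico]
    constructor
    · rintro ⟨hd, hN0⟩
      by_cases h1 : d = 1
      · exact Or.inl h1
      by_cases hdN : d = N
      · exact Or.inr (Or.inl hdN)
      right; right
      obtain ⟨e, rfl⟩ := hd
      have hd0 : 0 < d := Nat.pos_of_ne_zero (by rintro rfl; exact hN0 (by simp))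
      have he0 : 0 < e := Nat.pos_of_ne_zero (by rintro rfl; exact hN0 (by simp))
      have he1 : e ≠ 1 := by rintro rfl; exact hdN (by simp)
      have he2 : 2 ≤ e := by omega
      have hmul : d * 2 ≤ d * e := Nat.mul_le_mul_left d he2
      have hhalf : d ≤ d * e / 2 := (Nat.le_div_iff_mul_le (by norm_num)).mpr hmul
      exact ⟨⟨by omega, by omega⟩, Dvd.intro e rfl⟩
    · rintro (rfl | h | ⟨⟨h2d, _⟩, hdvd⟩)
      · exact ⟨one_dvd N, by omega⟩
      · subst h
        exact ⟨dvd_refl _, by omega⟩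
      · exact ⟨hdvd, by omega⟩
  have hNhalf : N / 2 < N := Nat.div_lt_self (by omega) (by norm_num)
  have hNnot : N ∉ (Finset.Ico 2 (N / 2 + 1)).filter (fun k => k ∣ N) := by
    simp only [Finset.mem_filter, Finset.mem_Ico]
    rintro ⟨⟨-, h⟩, -⟩
    omega
  have h1not : 1 ∉ insert N ((Finset.Ico 2 (N / 2 + 1)).filter (fun k => k ∣ N)) := by
    simp only [Finset.mem_insert, Finset.mem_filter, Finset.mem_Ico]
    rintro (h | ⟨⟨h, -⟩, -⟩) <;> omega
  rw [hdiv, Finset.card_insert_of_notMem h1not, Finset.card_insert_of_notMem hNnot]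
  push_cast
  ring

-- B's while loop computes a paired-divisor sum
theorem pvDivCountLoop_spec (N : Nat) : ∀ fuel k : Nat, N + 1 - k ≤ fuel → 1 ≤ k → ∀ nb : Int,
    pvDivCountLoop (N : Int) (k : Int) nb
      = nb + ∑ e ∈ Finset.Ico k (N + 1),
          (if e * e ≤ N ∧ e ∣ N then (if e * e = N then (1 : Int) else 2) else 0) := by
  intro fuel
  induction fuel with
  | zero =>
    intro k hf hk nb
    have hk' : N + 1 ≤ k := by omega
    have hNk : (N : Int) < (k : Int) := by exact_mod_cast hk'
    rw [pvDivCountLoop,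
      dif_neg (show ¬((k : Int) * (k : Int) ≤ (N : Int)) by
        intro hcon; nlinarith [pvIntLeMulSelf (k : Int)]),
      Finset.Ico_eq_empty (by omega), Finset.sum_empty, add_zero]
  | succ fuel ih =>
    intro k hf hk nb
    by_cases hkk : k * k ≤ N
    · have hkN : k ≤ N := le_trans (by nlinarith) hkk
      rw [pvDivCountLoop, dif_pos (by exact_mod_cast hkk)]
      have hcast : (k : Int) + 1 = ((k + 1 : Nat) : Int) := by push_cast; ring
      rw [hcast, ih (k + 1) (by omega) (by omega)]
      rw [Finset.sum_eq_sum_Ico_succ_bot (by omega : k < N + 1)]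
      by_cases hd : k ∣ N
      · have hm : PySem.Int.mod (N : Int) (k : Int) = 0 :=
          (PySem.Int.mod_eq_zero_iff_dvd _ _).mpr (Int.natCast_dvd_natCast.mpr hd)
        by_cases hs : k * k = N
        · have hq : ((k : Int) * (k : Int)) = (N : Int) := by exact_mod_cast hs
          simp only [hm, hq, BEq.rfl, if_true, if_pos hs, if_pos (And.intro hkk hd)]
          ring
        · have hq : ¬ ((k : Int) * (k : Int)) = (N : Int) := by
            intro hcon; exact hs (by exact_mod_cast hcon)
          simp only [hm, BEq.rfl, if_true, beq_iff_eq, if_neg hq, if_neg hs,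
            if_pos (And.intro hkk hd)]
          ring
      · have hm : ¬ PySem.Int.mod (N : Int) (k : Int) = 0 := by
          intro hcon
          exact hd (Int.natCast_dvd_natCast.mp ((PySem.Int.mod_eq_zero_iff_dvd _ _).mp hcon))
        simp only [beq_iff_eq, if_neg hm, if_neg (show ¬ (k * k ≤ N ∧ k ∣ N) from fun h => hd h.2)]
        ring
    · rw [pvDivCountLoop, dif_neg (by exact_mod_cast hkk)]
      have hz : (∑ e ∈ Finset.Ico k (N + 1),
          (if e * e ≤ N ∧ e ∣ N then (if e * e = N then (1 : Int) else 2) else 0)) = 0 := by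
        apply Finset.sum_eq_zero
        intro e he
        simp only [Finset.mem_Ico] at he
        rw [if_neg]
        rintro ⟨hle, -⟩
        have : k * k ≤ e * e := Nat.mul_le_mul he.1 he.1
        omega
      rw [hz, add_zero]

-- the pairing argument: summing 2 per small divisor (1 at the square root) counts all divisors
theorem pvPairing (N : Nat) (hN : 1 ≤ N) :
    (∑ e ∈ Finset.Ico 1 (N + 1),
        (if e * e ≤ N ∧ e ∣ N then (if e * e = N then (1 : Int) else 2) else 0))
      = (N.divisors.card : Int) := by
  rw [← Finset.sum_filter]
  have hset : (Finset.Ico 1 (N + 1)).filter (fun e => e * e ≤ N ∧ e ∣ N)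
      = N.divisors.filter (fun e => e * e ≤ N) := by
    ext e
    simp only [Finset.mem_filter, Finset.mem_Ico, Nat.mem_divisors]
    constructor
    · rintro ⟨⟨h1, h2⟩, h3, h4⟩
      exact ⟨⟨h4, by omega⟩, h3⟩
    · rintro ⟨⟨h1, h2⟩, h3⟩
      have he1 : 1 ≤ e := Nat.pos_of_ne_zero (by rintro rfl; exact h2 (Nat.eq_zero_of_zero_dvd h1))
      have heN : e ≤ N := Nat.le_of_dvd (by omega) h1
      exact ⟨⟨he1, by omega⟩, h3, h1⟩
  rw [hset]
  have hN0 : N ≠ 0 := by omega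
  have key1 : ∀ d ∈ N.divisors.filter (fun e => ¬ e * e ≤ N),
      N / d ∈ (N.divisors.filter (fun e => e * e ≤ N)).filter (fun e => ¬ e * e = N) := by
    intro d hd
    simp only [Finset.mem_filter, Nat.mem_divisors] at hd ⊢
    obtain ⟨⟨⟨e, rfl⟩, hne⟩, hgt⟩ := hd
    have hd0 : 0 < d := Nat.pos_of_ne_zero (fun h => hne (by subst h; simp))
    have he0 : 0 < e := Nat.pos_of_ne_zero (fun h => hne (by subst h; simp))
    have hlt : e < d := Nat.lt_of_mul_lt_mul_left (Nat.lt_of_not_le hgt)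
    have hdiv : d * e / d = e := Nat.mul_div_cancel_left e hd0
    rw [hdiv]
    exact ⟨⟨⟨Dvd.intro_left d rfl, hne⟩, by nlinarith⟩, by nlinarith⟩
  have key2 : ∀ e ∈ (N.divisors.filter (fun e => e * e ≤ N)).filter (fun e => ¬ e * e = N),
      N / e ∈ N.divisors.filter (fun e => ¬ e * e ≤ N) := by
    intro e he
    simp only [Finset.mem_filter, Nat.mem_divisors] at he ⊢
    obtain ⟨⟨⟨⟨d, rfl⟩, hne⟩, hle⟩, hsq⟩ := he
    have he0 : 0 < e := Nat.pos_of_ne_zero (fun h => hne (by subst h; simp))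
    have hd0 : 0 < d := Nat.pos_of_ne_zero (fun h => hne (by subst h; simp))
    have hlt : e < d := Nat.lt_of_mul_lt_mul_left (lt_of_le_of_ne hle hsq)
    have hdiv : e * d / e = d := Nat.mul_div_cancel_left d he0
    rw [hdiv]
    exact ⟨⟨dvd_mul_left d e, hne⟩, by nlinarith⟩
  have hinv1 : ∀ d ∈ N.divisors.filter (fun e => ¬ e * e ≤ N), N / (N / d) = d := by
    intro d hd
    simp only [Finset.mem_filter, Nat.mem_divisors] at hd
    exact Nat.div_div_self hd.1.1 hN0
  have hinv2 : ∀ e ∈ (N.divisors.filter (fun e => e * e ≤ N)).filter (fun e => ¬ e * e = N),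
      N / (N / e) = e := by
    intro e he
    simp only [Finset.mem_filter, Nat.mem_divisors] at he
    exact Nat.div_div_self he.1.1.1 hN0
  have hcard : (N.divisors.filter (fun e => ¬ e * e ≤ N)).card
      = ((N.divisors.filter (fun e => e * e ≤ N)).filter (fun e => ¬ e * e = N)).card :=
    Finset.card_nbij' (fun d => N / d) (fun e => N / e)
      (fun d hd => key1 d (Finset.mem_coe.mp hd))
      (fun e he => key2 e (Finset.mem_coe.mp he))
      (fun d hd => hinv1 d (Finset.mem_coe.mp hd))
      (fun e he => hinv2 e (Finset.mem_coe.mp he))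
  have h1 : ((N.divisors.filter (fun e => e * e ≤ N)).filter (fun e => e * e = N)).card
      + ((N.divisors.filter (fun e => e * e ≤ N)).filter (fun e => ¬ e * e = N)).card
      = (N.divisors.filter (fun e => e * e ≤ N)).card :=
    Finset.filter_card_add_filter_neg_card_eq_card _
  have h2 : (N.divisors.filter (fun e => e * e ≤ N)).card
      + (N.divisors.filter (fun e => ¬ e * e ≤ N)).card = N.divisors.card :=
    Finset.filter_card_add_filter_neg_card_eq_card _
  rw [Finset.sum_ite, Finset.sum_const, Finset.sum_const]
  simp only [nsmul_eq_mul]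
  push_cast
  omega

theorem pvB_eq_divisors (N : Nat) (hN : 1 ≤ N) :
    pvDivCountLoop (N : Int) 1 0 = (N.divisors.card : Int) := by
  have h := pvDivCountLoop_spec N (N + 1 - 1) 1 (le_refl _) (le_refl _) 0
  push_cast at h
  rw [h, pvPairing N hN]
  ring

-- degenerate inputs: A returns 2, B returns 0 or 1
theorem pvA_small (n : Int) (hn : n < 2) : nombre_de_diviseurs_2 n = 2 := by
  unfold nombre_de_diviseurs_2
  have h : PySem.Int.floordiv n 2 < 1 := by
    rw [PySem.Int.floordiv_lt_iff_lt_mul (by norm_num)]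
    omega
  rw [PySem.List.pyRange_one_eq_nil (by omega)]
  rfl

theorem pvB_small (n : Int) (hn : n < 2) : pvDivCountLoop n 1 0 = 0 ∨ pvDivCountLoop n 1 0 = 1 := by
  by_cases h1 : (1 : Int) * 1 ≤ n
  · have hn1 : n = 1 := by omega
    subst hn1
    right
    rw [pvDivCountLoop, dif_pos (by norm_num)]
    have e1 : (PySem.Int.mod (1 : Int) 1 == 0) = true := by decide
    have e2 : ((1 : Int) * 1 == 1) = true := by decide
    rw [e1, e2]
    simp only [if_true]
    rw [pvDivCountLoop, dif_neg (by norm_num)]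
    norm_num
  · left
    rw [pvDivCountLoop, dif_neg h1]

-- per-number agreement of the tests "= 4" and "= 8"
theorem pvAgree (n : Int) :
    ((nombre_de_diviseurs_2 n = 4) ↔ (pvDivCountLoop n 1 0 = 4)) ∧
    ((nombre_de_diviseurs_2 n = 8) ↔ (pvDivCountLoop n 1 0 = 8)) := by
  by_cases hn : n < 2
  · have hA := pvA_small n hn
    have hB := pvB_small n hn
    constructor <;> constructor <;> intro h <;> omega
  · have hn2 : (2:Int) ≤ n := by omega
    obtain ⟨N, rfl⟩ : ∃ N : Nat, n = (N : Int) := ⟨n.toNat, (Int.toNat_of_nonneg (by omega)).symm⟩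
    have hN : 2 ≤ N := by exact_mod_cast hn2
    rw [pvA_eq_divisors N hN, pvB_eq_divisors N (by omega)]
    exact ⟨Iff.rfl, Iff.rfl⟩

-- ===== VERDICT (by name: the statement is the Claim_ definition above) =====
theorem quatre_et_huit_diviseurs_spec : Claim_equal_quatre_et_huit_diviseurs := by
  intro Nmin Nmax _
  unfold Spec_quatre_et_huit_diviseurs quatre_et_huit_diviseurs quatre_et_huit_diviseurs_alt
  have hfun : (fun (s : Int × Int) n =>
      let nb := nombre_de_diviseurs n
      let nb_quatre := if nb == 4 then s.1 + 1 else s.1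
      let nb_huit := if nb == 8 then s.2 + 1 else s.2
      (nb_quatre, nb_huit))
    = (fun (s : Int × Int) n =>
      let nb := pvDivCountLoop n 1 0
      if nb == 4 then (s.1 + 1, s.2)
      else if nb == 8 then (s.1, s.2 + 1)
      else s) := by
    funext s n
    obtain ⟨h4, h8⟩ := pvAgree n
    simp only [nombre_de_diviseurs, beq_iff_eq]
    by_cases c4 : nombre_de_diviseurs_2 n = 4
    · have : pvDivCountLoop n 1 0 = 4 := h4.mp c4
      simp [c4, this]
    · by_cases c8 : nombre_de_diviseurs_2 n = 8
      · have b8 : pvDivCountLoop n 1 0 = 8 := h8.mp c8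
        have b4 : ¬ pvDivCountLoop n 1 0 = 4 := fun h => by omega
        simp [c8, b8]
      · have b4 : ¬ pvDivCountLoop n 1 0 = 4 := fun h => c4 (h4.mpr h)
        have b8 : ¬ pvDivCountLoop n 1 0 = 8 := fun h => c8 (h8.mpr h)
        simp [c4, c8, b4, b8]
  rw [hfun]
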